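-- pv_equiv track=rewrite | github.com/LuinN/VedioGenProject | code/server/wan_local_service/app/wan_runner.py | _extract_failure_summary
-- ===== SOURCE A (Python) =====
-- from collections import deque
--
-- def _extract_failure_summary(recent_lines: deque[str]) -> str | None:
--     fallback: str | None = None
--     ignored_prefixes = (
--         "started_at:",
--         "task_id:",
--         "mode:",
--         "size:",
--         "command:",
--     )
--     ignored_exact = {
--         "-" * 80,
--         "Generating video ...",
--     }
--     for line in reversed(recent_lines):
--         if line.startswith(ignored_prefixes):
--             continue
--         if line in ignored_exact:
--             continue
--         if line == "Traceback (most recent call last):":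
--             if fallback is None:
--                 fallback = line
--             continue
--         return line
--     return fallback
-- ===== SOURCE B (Python) =====
-- def _extract_failure_summary(recent_lines):
--     ignored_prefixes = (
--         "started_at:",
--         "task_id:",
--         "mode:",
--         "size:",
--         "command:",
--     )
--     ignored_exact = {
--         "-" * 80,
--         "Generating video ...",
--     }
--     traceback_marker = "Traceback (most recent call last):"
--     result = None
--     fallback = None
--     for line in recent_lines:
--         if line.startswith(ignored_prefixes) or line in ignored_exact:
--             continue
--         if line == traceback_marker:
--             fallback = line
--         else:
--             result = line
--     return result if result is not None else fallback
-- ===== Notes on version B (the rewrite author's own statement) =====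
-- stated objective: alternative
-- what changed: Replaced the reverse-iteration early-return scan with a single forward last-wins pass that overwrites a result accumulator and records the Traceback marker as a fallback, returning result-or-fallback at the end.
import Mathlib
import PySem

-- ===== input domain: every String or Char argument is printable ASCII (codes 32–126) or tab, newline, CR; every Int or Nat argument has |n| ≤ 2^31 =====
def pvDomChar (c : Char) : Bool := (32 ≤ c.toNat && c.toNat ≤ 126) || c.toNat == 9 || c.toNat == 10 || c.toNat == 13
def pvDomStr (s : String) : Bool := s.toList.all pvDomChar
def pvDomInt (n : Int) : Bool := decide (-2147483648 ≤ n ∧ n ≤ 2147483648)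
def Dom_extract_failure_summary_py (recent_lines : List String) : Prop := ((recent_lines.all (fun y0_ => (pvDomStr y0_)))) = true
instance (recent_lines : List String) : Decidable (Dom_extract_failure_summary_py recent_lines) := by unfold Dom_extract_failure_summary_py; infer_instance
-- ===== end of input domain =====

-- B replaces A's reverse-iteration early-return scan with a forward last-wins pass (alternative decomposition, same cost).

-- ===== PORT A =====
-- "-" * 80
def pvDash80 : String := "--------------------------------------------------------------------------------"

def pvTB : String := "Traceback (most recent call last):"

-- line.startswith(ignored_prefixes)
def pvIgnPrefix (line : String) : Bool :=
  PySem.Str.startswith line "started_at:" || PySem.Str.startswith line "task_id:" ||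
  PySem.Str.startswith line "mode:" || PySem.Str.startswith line "size:" ||
  PySem.Str.startswith line "command:"

-- A's loop over reversed(recent_lines), carrying the fallback variable
def pvALoop : List String → Option String → Option String
  | [], fb => fb
  | line :: rest, fb =>
    if pvIgnPrefix line then pvALoop rest fb
    else if line == pvDash80 || line == "Generating video ..." then pvALoop rest fb
    else if line == pvTB then pvALoop rest (if fb = none then some line else fb)
    else some line

def extract_failure_summary_py (recent_lines : List String) : Option String :=
  pvALoop recent_lines.reverse none

-- ===== PORT B =====
-- B's forward loop body: state is (result, fallback)
def pvBStep (s : Option String × Option String) (line : String) : Option String × Option String :=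
  if pvIgnPrefix line || (line == pvDash80 || line == "Generating video ...") then s
  else if line == pvTB then (s.1, some line)
  else (some line, s.2)

def extract_failure_summary_py_alt (recent_lines : List String) : Option String :=
  let s := recent_lines.foldl pvBStep (none, none)
  match s.1 with
  | some r => some r
  | none => s.2

-- ===== PRECONDITION & SPEC =====
def Spec_extract_failure_summary_py (recent_lines : List String) (out : Option String) : Prop := out = extract_failure_summary_py_alt recent_lines
instance (recent_lines : List String) (out : Option String) : Decidable (Spec_extract_failure_summary_py recent_lines out) := by unfold Spec_extract_failure_summary_py; infer_instance

-- ===== CLAIM (what is proved, stated in full; the proofs are below) =====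
def Claim_equal_extract_failure_summary_py : Prop := ∀ (recent_lines : List String), Dom_extract_failure_summary_py recent_lines → Spec_extract_failure_summary_py recent_lines (extract_failure_summary_py recent_lines)

-- ===== LEMMAS AND PROOFS =====

-- a line is "meaningful" iff it is neither ignored nor the Traceback marker
def pvGood (line : String) : Bool :=
  !(pvIgnPrefix line || (line == pvDash80 || line == "Generating video ...")) && !(line == pvTB)

lemma pvTB_not_skipped :
    pvIgnPrefix pvTB = false ∧ (pvTB == pvDash80 || pvTB == "Generating video ...") = false := by
  constructor <;> decide

lemma pvTB_ne_of_skipped (x : String)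
    (h : (pvIgnPrefix x || (x == pvDash80 || x == "Generating video ...")) = true) :
    ¬ (pvTB = x) := by
  intro he
  rw [← he] at h
  rw [pvTB_not_skipped.1, pvTB_not_skipped.2] at h
  simp at h

lemma pvALoop_eq (m : List String) (fb : Option String) :
    pvALoop m fb =
      match (m.filter pvGood).head? with
      | some x => some x
      | none =>
        match fb with
        | some y => some y
        | none => if pvTB ∈ m then some pvTB else none := by
  induction m generalizing fb with
  | nil => cases fb <;> simp [pvALoop]
  | cons x rest ih =>
    by_cases hsk : (pvIgnPrefix x || (x == pvDash80 || x == "Generating video ...")) = true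
    · have hne : ¬ (pvTB = x) := pvTB_ne_of_skipped x hsk
      have hgood : pvGood x = false := by simp [pvGood, hsk]
      rcases Bool.or_eq_true_iff.mp hsk with hp | he
      · simp only [pvALoop, hp, if_true, List.filter_cons, hgood, Bool.false_eq_true, if_false]
        rw [ih]
        cases (rest.filter pvGood).head? <;> cases fb <;> simp [List.mem_cons, hne]
      · have hp' : pvIgnPrefix x = true ∨ pvIgnPrefix x = false := by
          cases pvIgnPrefix x <;> simp
        rcases hp' with hp | hp
        · simp only [pvALoop, hp, if_true, List.filter_cons, hgood, Bool.false_eq_true, if_false]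
          rw [ih]
          cases (rest.filter pvGood).head? <;> cases fb <;> simp [List.mem_cons, hne]
        · simp only [pvALoop, hp, Bool.false_eq_true, if_false, he, if_true, List.filter_cons,
            hgood]
          rw [ih]
          cases (rest.filter pvGood).head? <;> cases fb <;> simp [List.mem_cons, hne]
    · have hsk' := Bool.not_eq_true _ ▸ hsk
      have hp : pvIgnPrefix x = false := by
        cases h : pvIgnPrefix x
        · rfl
        · exact absurd (by rw [h]; simp) hsk
      have he : (x == pvDash80 || x == "Generating video ...") = false := by
        cases h : (x == pvDash80 || x == "Generating video ...")
        · rfl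
        · exact absurd (by rw [hp, h]; simp) hsk
      by_cases htb : x = pvTB
      · subst htb
        have hgood : pvGood pvTB = false := by simp [pvGood]
        simp only [pvALoop, hp, Bool.false_eq_true, if_false, he, beq_self_eq_true, if_true,
          List.filter_cons, hgood]
        cases fb with
        | none =>
          rw [ih]
          cases (rest.filter pvGood).head? <;> simp [List.mem_cons]
        | some y =>
          have hif : (if (some y : Option String) = none then some pvTB else some y) = some y := by
            simp
          rw [hif, ih]
      · have hbe : (x == pvTB) = false := by simp [htb]
        have hgood : pvGood x = true := by simp [pvGood, hp, he, hbe]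
        simp [pvALoop, hp, he, hbe, hgood]

lemma pvBFold_eq (m : List String) (r f : Option String) :
    m.foldl pvBStep (r, f) =
      ((match (m.filter pvGood).getLast? with
        | some x => some x
        | none => r),
       if pvTB ∈ m then some pvTB else f) := by
  induction m generalizing r f with
  | nil => simp
  | cons x rest ih =>
    by_cases hsk : (pvIgnPrefix x || (x == pvDash80 || x == "Generating video ...")) = true
    · have hne : ¬ (pvTB = x) := pvTB_ne_of_skipped x hsk
      have hgood : pvGood x = false := by simp [pvGood, hsk]
      simp only [List.foldl_cons, pvBStep, hsk, if_true, List.filter_cons, hgood,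
        Bool.false_eq_true, if_false]
      rw [ih]
      simp [List.mem_cons, hne]
    · have hsk' : (pvIgnPrefix x || (x == pvDash80 || x == "Generating video ...")) = false := by
        cases h : (pvIgnPrefix x || (x == pvDash80 || x == "Generating video ..."))
        · rfl
        · exact absurd h hsk
      by_cases htb : x = pvTB
      · subst htb
        have hgood : pvGood pvTB = false := by simp [pvGood]
        simp only [List.foldl_cons, pvBStep, hsk', Bool.false_eq_true, if_false,
          beq_self_eq_true, if_true, List.filter_cons, hgood]
        rw [ih]
        simp only [List.mem_cons, true_or, if_true]
        by_cases h : pvTB ∈ rest <;> simp [h]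
      · have hbe : (x == pvTB) = false := by simp [htb]
        have hne : ¬ (pvTB = x) := fun h => htb h.symm
        have hgood : pvGood x = true := by simp [pvGood, hsk', hbe]
        simp only [List.foldl_cons, pvBStep, hsk', Bool.false_eq_true, if_false, hbe,
          List.filter_cons, hgood, if_true]
        rw [ih]
        simp only [List.mem_cons, hne, false_or]
        cases h : (rest.filter pvGood).getLast? <;> simp [List.getLast?_cons, h]

-- ===== VERDICT (by name: the statement is the Claim_ definition above) =====
theorem extract_failure_summary_py_spec : Claim_equal_extract_failure_summary_py := by
  intro l _
  show extract_failure_summary_py l = extract_failure_summary_py_alt l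
  unfold extract_failure_summary_py extract_failure_summary_py_alt
  rw [pvALoop_eq, pvBFold_eq]
  have h1 : (l.reverse.filter pvGood).head? = (l.filter pvGood).getLast? := by
    rw [List.filter_reverse, List.head?_reverse]
  have h2 : (pvTB ∈ l.reverse) ↔ (pvTB ∈ l) := List.mem_reverse
  simp only [h1]
  cases h : ((l.filter pvGood).getLast?) <;> by_cases hc : pvTB ∈ l <;>
    simp [h2, hc]
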